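-- pv_equiv track=rewrite | github.com/JasonGross/characters | python/alphabetsutil.py | uint_encode
-- ===== SOURCE A (Python) =====
-- BIG_BYTE_PLUS_ONE = 1 << 8
--
-- def uint_encode(number, total_bytes=0):
--     rtn = []
--     while number:
--         rtn.append(chr(number % BIG_BYTE_PLUS_ONE))
--         number >>= 8
--     while total_bytes > len(rtn):
--         rtn.append('\x00')
--     return ''.join(reversed(rtn))
-- ===== SOURCE B (Python) =====
-- def uint_encode(number, total_bytes=0):
--     # compute output length first, then build big-endian in one forward pass
--     length = 0
--     n = number
--     while n:
--         length += 1
--         n >>= 8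
--     if total_bytes > length:
--         length = total_bytes
--     return ''.join(chr((number >> (8 * (length - 1 - i))) & 0xff)
--                    for i in range(length))
-- ===== Notes on version B (the rewrite author's own statement) =====
-- stated objective: alternative
-- what changed: B first counts the byte length, then emits the bytes big-endian in a single forward pass by shifting, with no intermediate list, no separate padding loop and no reversal; A builds a little-endian list, pads it, then reverses.
import Mathlib
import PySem

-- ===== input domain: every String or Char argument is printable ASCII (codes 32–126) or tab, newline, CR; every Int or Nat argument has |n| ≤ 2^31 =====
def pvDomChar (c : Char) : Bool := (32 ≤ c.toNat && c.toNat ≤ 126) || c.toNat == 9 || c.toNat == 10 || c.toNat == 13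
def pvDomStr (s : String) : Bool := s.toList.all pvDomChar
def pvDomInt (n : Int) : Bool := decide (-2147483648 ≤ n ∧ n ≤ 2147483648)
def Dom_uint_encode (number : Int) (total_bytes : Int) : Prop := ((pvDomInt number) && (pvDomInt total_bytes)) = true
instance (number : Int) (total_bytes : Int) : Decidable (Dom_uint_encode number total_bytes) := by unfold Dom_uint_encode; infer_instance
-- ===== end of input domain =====

-- B builds the big-endian string in one forward pass from a pre-computed length (no list, no padding loop, no reversal); return values proved equal for 0 ≤ number.


-- ===== PORT A =====
-- the 'while number:' digit-collecting loop (little-endian); the 0 < n condition is a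
-- totality guard only (Python diverges for negative number; excluded by Pre_)
def uintDigitsA (n : Int) : List Char :=
  if _h : 0 < n then
    Char.ofNat (PySem.Int.mod n 256).toNat :: uintDigitsA (PySem.Int.floordiv n 256)
  else []
termination_by n.toNat
decreasing_by
  rw [PySem.Int.floordiv_eq_ediv_of_pos (by omega)]
  omega

-- the 'while total_bytes > len(rtn): rtn.append('\x00')' padding loop, k appends
def padA (rtn : List Char) (k : Nat) : List Char :=
  match k with
  | 0 => rtn
  | Nat.succ k => padA (rtn ++ ['\x00']) k

def uint_encode (number : Int) (total_bytes : Int) : String :=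
  String.mk (padA (uintDigitsA number)
    (total_bytes - (uintDigitsA number).length).toNat).reverse

-- ===== PORT B =====
-- the length-counting loop of B ('while n: length += 1; n >>= 8'); same totality guard
def uintLenB (n : Int) : Nat :=
  if _h : 0 < n then 1 + uintLenB (PySem.Int.floordiv n 256) else 0
termination_by n.toNat
decreasing_by
  rw [PySem.Int.floordiv_eq_ediv_of_pos (by omega)]
  omega

-- ''.join(chr((number >> (8*(length-1-i))) & 0xff) for i in range(length)), length = max(len, total_bytes)
def uint_encode_alt (number : Int) (total_bytes : Int) : String :=
  String.mk ((List.range (max (uintLenB number : Int) total_bytes).toNat).map (fun i =>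
    Char.ofNat ((PySem.Int.mod
      (PySem.Int.floordiv number
        ((2:Int) ^ (8 * ((max (uintLenB number : Int) total_bytes).toNat - 1 - i)))) 256).toNat)))

-- ===== PRECONDITION & SPEC =====
-- Pre_ excludes negative number: there A's first while-loop never terminates (number >>= 8 stalls at -1)
def Pre_uint_encode (number : Int) (total_bytes : Int) : Prop := 0 ≤ number
instance (number : Int) (total_bytes : Int) : Decidable (Pre_uint_encode number total_bytes) := by
  unfold Pre_uint_encode; infer_instance
def pvWitness_uint_encode : Int × Int := (300, 5)

def Spec_uint_encode (number : Int) (total_bytes : Int) (out : String) : Prop := out = uint_encode_alt number total_bytes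
instance (number : Int) (total_bytes : Int) (out : String) : Decidable (Spec_uint_encode number total_bytes out) := by unfold Spec_uint_encode; infer_instance

-- ===== CLAIM (what is proved, stated in full; the proofs are below) =====
def Claim_equal_uint_encode : Prop := ∀ (number : Int) (total_bytes : Int), Dom_uint_encode number total_bytes → Pre_uint_encode number total_bytes → Spec_uint_encode number total_bytes (uint_encode number total_bytes)

-- ===== LEMMAS AND PROOFS =====

theorem uintLenB_eq_length (n : Int) : uintLenB n = (uintDigitsA n).length := by
  unfold uintLenB uintDigitsA
  split
  · rw [uintLenB_eq_length (PySem.Int.floordiv n 256)]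
    simp
    omega
  · rfl
termination_by n.toNat
decreasing_by
  rw [PySem.Int.floordiv_eq_ediv_of_pos (by omega)]
  omega

-- n fits in uintLenB n bytes
theorem uintLenB_bound (n : Int) (hn : 0 ≤ n) : n < 256 ^ uintLenB n := by
  unfold uintLenB
  split
  · rename_i h
    have h2 : (0:Int) ≤ PySem.Int.floordiv n 256 := by
      rw [PySem.Int.floordiv_eq_ediv_of_pos (by omega)]; omega
    have ih := uintLenB_bound (PySem.Int.floordiv n 256) h2
    rw [PySem.Int.floordiv_eq_ediv_of_pos (by omega)] at ih ⊢
    rw [pow_add, pow_one]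
    have hmod : n % 256 < 256 := Int.emod_lt_of_pos n (by omega)
    have heq : 256 * (n / 256) + n % 256 = n := Int.ediv_add_emod n 256
    nlinarith [ih, hmod]
  · rename_i h
    simp only [pow_zero]
    omega
termination_by n.toNat
decreasing_by
  rw [PySem.Int.floordiv_eq_ediv_of_pos (by omega)]
  omega

theorem high_div_zero (n : Int) (hn : 0 ≤ n) (e : Nat) (he : uintLenB n ≤ e) :
    n / 256 ^ e = 0 := by
  have hb := uintLenB_bound n hn
  have : n < 256 ^ e := lt_of_lt_of_le hb (pow_le_pow_right₀ (by norm_num) he)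
  exact Int.ediv_eq_zero_of_lt hn this

-- little-endian characterization of A's digit list
theorem uintDigitsA_spec (n : Int) (hn : 0 ≤ n) :
    uintDigitsA n = (List.range (uintLenB n)).map
      (fun i => Char.ofNat ((n / 256 ^ i % 256).toNat)) := by
  unfold uintDigitsA uintLenB
  split
  · rename_i h
    have h2 : (0:Int) ≤ PySem.Int.floordiv n 256 := by
      rw [PySem.Int.floordiv_eq_ediv_of_pos (by omega)]; omega
    have ih := uintDigitsA_spec (PySem.Int.floordiv n 256) h2
    rw [ih, PySem.Int.floordiv_eq_ediv_of_pos (by norm_num),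
        PySem.Int.mod_eq_emod_of_pos (by norm_num)]
    rw [Nat.add_comm 1, List.range_succ_eq_map]
    simp only [List.map_cons, List.map_map, Function.comp_def, pow_zero, Int.ediv_one]
    congr 1
    apply List.map_congr_left
    intro i _
    congr 1
    rw [Nat.succ_eq_add_one, pow_succ', Int.ediv_ediv_eq_ediv_mul (show (0:Int) ≤ 256 by norm_num)]
  · rfl
termination_by n.toNat
decreasing_by
  rw [PySem.Int.floordiv_eq_ediv_of_pos (by omega)]
  omega

theorem padA_eq (rtn : List Char) (k : Nat) : padA rtn k = rtn ++ List.replicate k '\x00' := by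
  induction k generalizing rtn with
  | zero => simp [padA]
  | succ k ih =>
    rw [padA, ih, List.append_assoc]
    simp [List.replicate_succ]

-- ===== VERDICT (by name: the statement is the Claim_ definition above) =====
theorem uint_encode_spec : Claim_equal_uint_encode := by
  intro number total_bytes _ hpre
  unfold Spec_uint_encode uint_encode uint_encode_alt
  have hn : 0 ≤ number := hpre
  set L0 : Nat := uintLenB number with hL0
  have hlen : (uintDigitsA number).length = L0 := (uintLenB_eq_length number).symm
  set Lt : Nat := (max (L0:Int) total_bytes).toNat with hLt
  have hL0le : L0 ≤ Lt := by omega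
  have hpad : (total_bytes - ((uintDigitsA number).length : Int)).toNat = Lt - L0 := by
    rw [hlen]; omega
  rw [hpad, padA_eq, uintDigitsA_spec number hn, ← hL0]
  congr 1
  rw [List.reverse_append, List.reverse_replicate]
  apply List.ext_getElem
  · simp; omega
  intro i h1 h2
  have hiLt : i < Lt := by simpa using h2
  simp only [List.getElem_map, List.getElem_range]
  have hp : ∀ k : Nat, (2:Int) ^ (8 * k) = 256 ^ k := by
    intro k; rw [pow_mul]; norm_num
  rw [hp, PySem.Int.floordiv_eq_ediv_of_pos (by positivity),
      PySem.Int.mod_eq_emod_of_pos (by norm_num)]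
  by_cases hi : i < Lt - L0
  · rw [List.getElem_append_left (by simp; omega)]
    have hz : number / 256 ^ (Lt - 1 - i) = 0 := by
      apply high_div_zero number hn
      omega
    rw [hz]
    simp [List.getElem_replicate]
  · rw [List.getElem_append_right (by simp; omega)]
    simp only [List.getElem_reverse, List.getElem_map, List.getElem_range,
      List.length_map, List.length_range, List.length_replicate]
    have hidx : L0 - 1 - (i - (Lt - L0)) = Lt - 1 - i := by omega
    rw [hidx]
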